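-- pv_equiv track=rewrite | github.com/LucyIvatt/Advent-of-Code-22 | 2023/01 Trebuchet/solution.py | find_number_locations
-- ===== SOURCE A (Python) =====
-- NUMBER_DICT = {'one':   1,
--                'two':   2,
--                'three': 3,
--                'four':  4,
--                'five':  5,
--                'six':   6,
--                'seven': 7,
--                'eight': 8,
--                'nine':  9}
--
-- def find_number_locations(puzzle_input):
--     modified_input = []
--
--     for string in puzzle_input:
--         number_locations = {}
--
--         # Saves location index of worded numbers
--         for word, number in NUMBER_DICT.items():
--             ind = string.find(word)
--             if ind != -1: number_locations[ind]= str(number)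
--
--         # Saves location of digits
--         for i in range(len(string)):
--             if string[i].isdigit():
--                 number_locations[i]=string[i]
--
--         modified_input.append(number_locations)
--     return modified_input
-- ===== SOURCE B (Python) =====
-- NUMBER_DICT = {'one':   1,
--                'two':   2,
--                'three': 3,
--                'four':  4,
--                'five':  5,
--                'six':   6,
--                'seven': 7,
--                'eight': 8,
--                'nine':  9}
--
-- # word candidates indexed by their first letter, with str(number) precomputed
-- _BY_FIRST = {}
-- for _w, _n in NUMBER_DICT.items():
--     _BY_FIRST.setdefault(_w[0], []).append((_w, str(_n)))
--
--
-- def find_number_locations(puzzle_input):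
--     modified_input = []
--     for string in puzzle_input:
--         found = {}      # word -> index of its first occurrence
--         digits = []     # (index, digit character) in order
--         for i, ch in enumerate(string):
--             if ch.isdigit():
--                 digits.append((i, ch))
--             else:
--                 for word, value in _BY_FIRST.get(ch, ()):
--                     if word not in found and string.startswith(word, i):
--                         found[word] = i
--         number_locations = {}
--         for word, number in NUMBER_DICT.items():
--             if word in found:
--                 number_locations[found[word]] = str(number)
--         for i, ch in digits:
--             number_locations[i] = ch
--         modified_input.append(number_locations)
--     return modified_input
-- ===== Notes on version B (the rewrite author's own statement) =====
-- stated objective: alternative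
-- what changed: Instead of running nine separate str.find scans plus a digit scan per line, B makes one combined left-to-right pass per line (recording each word-number's first occurrence via a first-letter index and a seen-dict, and every digit position), then assembles the dict in NUMBER_DICT order followed by the digits.
import Mathlib
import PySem

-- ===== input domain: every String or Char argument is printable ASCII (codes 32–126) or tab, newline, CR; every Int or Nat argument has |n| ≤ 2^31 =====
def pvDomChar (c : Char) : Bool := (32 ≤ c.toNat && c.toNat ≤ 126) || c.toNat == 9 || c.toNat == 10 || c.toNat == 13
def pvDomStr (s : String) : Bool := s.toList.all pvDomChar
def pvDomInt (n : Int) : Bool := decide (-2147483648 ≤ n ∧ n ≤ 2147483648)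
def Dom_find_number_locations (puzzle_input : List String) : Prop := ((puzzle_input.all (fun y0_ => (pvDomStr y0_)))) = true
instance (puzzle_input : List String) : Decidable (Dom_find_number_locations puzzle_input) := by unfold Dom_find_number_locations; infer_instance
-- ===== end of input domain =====

-- B makes a single combined left-to-right scan per line (recording each word's first
-- occurrence and every digit in one pass) instead of A's nine separate find-scans plus
-- a digit scan; objective: alternative (not measured faster).

-- ===== PORT A =====
-- NUMBER_DICT, in insertion order
def pvNUMBER_DICT : List (String × Int) :=
  [("one", 1), ("two", 2), ("three", 3), ("four", 4), ("five", 5),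
   ("six", 6), ("seven", 7), ("eight", 8), ("nine", 9)]

-- body of A's outer loop (one line of the puzzle input)
def pvLineA (string : String) : List (Int × String) :=
  let number_locations : PySem.Dict Int String :=
    pvNUMBER_DICT.foldl (fun number_locations wn =>
      let ind := PySem.Str.find string wn.1
      if ind != -1 then number_locations.insert ind (PySem.Int.toStr wn.2)
      else number_locations) PySem.Dict.empty
  let number_locations :=
    (PySem.List.pyRange 0 (PySem.Str.len string) 1).foldl (fun number_locations i =>
      match PySem.Str.pyGet? string i with
      | some c =>
          if PySem.Chars.strIsdigit [c] then number_locations.insert i (String.ofList [c])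
          else number_locations
      | none => number_locations) number_locations
  number_locations.items

def find_number_locations (puzzle_input : List String) : List (List (Int × String)) :=
  puzzle_input.foldl (fun modified_input string => modified_input ++ [pvLineA string]) []

-- ===== PORT B =====
-- _BY_FIRST: the module-level constant dict (first letter -> word-numbers starting with
-- it, in NUMBER_DICT order); its .get(ch, ()) lookup is ported as this function.
def pvBY_FIRST (c : Char) : List String :=
  if c = 'o' then ["one"]
  else if c = 't' then ["two", "three"]
  else if c = 'f' then ["four", "five"]
  else if c = 's' then ["six", "seven"]
  else if c = 'e' then ["eight"]
  else if c = 'n' then ["nine"]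
  else []

-- one step of B's combined scan; string.startswith(word, i) is ported by hand as a
-- prefix test on string[i:] (exact here: i is an enumerate index, so 0 ≤ i ≤ len)
def pvScanStep (cs : List Char) (st : PySem.Dict String Int × List (Int × String))
    (ic : Int × Char) : PySem.Dict String Int × List (Int × String) :=
  if PySem.Chars.strIsdigit [ic.2] then
    (st.1, st.2 ++ [(ic.1, String.ofList [ic.2])])
  else
    ((pvBY_FIRST ic.2).foldl (fun found word =>
        if !(found.contains word) && PySem.Chars.startswith (cs.drop ic.1.toNat) word.toList
        then found.insert word ic.1 else found) st.1,
     st.2)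

-- body of B's outer loop
def pvLineB (string : String) : List (Int × String) :=
  let st := (PySem.List.enumerate string.toList).foldl (pvScanStep string.toList)
              (PySem.Dict.empty, [])
  let number_locations : PySem.Dict Int String :=
    pvNUMBER_DICT.foldl (fun number_locations wn =>
      match st.1.get? wn.1 with
      | some i => number_locations.insert i (PySem.Int.toStr wn.2)
      | none => number_locations) PySem.Dict.empty
  let number_locations := st.2.foldl (fun number_locations p =>
      number_locations.insert p.1 p.2) number_locations
  number_locations.items

def find_number_locations_alt (puzzle_input : List String) : List (List (Int × String)) :=
  puzzle_input.foldl (fun modified_input string => modified_input ++ [pvLineB string]) []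

-- ===== PRECONDITION & SPEC =====
def Spec_find_number_locations (puzzle_input : List String) (out : List (List (Int × String))) : Prop := out = find_number_locations_alt puzzle_input
instance (puzzle_input : List String) (out : List (List (Int × String))) : Decidable (Spec_find_number_locations puzzle_input out) := by unfold Spec_find_number_locations; infer_instance

-- ===== CLAIM (what is proved, stated in full; the proofs are below) =====
def Claim_equal_find_number_locations : Prop := ∀ (puzzle_input : List String), Dom_find_number_locations puzzle_input → Spec_find_number_locations puzzle_input (find_number_locations puzzle_input)

-- ===== LEMMAS AND PROOFS =====

-- canonical per-line value both ports are reduced to: word items (NUMBER_DICT order,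
-- keyed by find's first-occurrence index) followed by digit items (left to right)
def pvWordPairs (cs : List Char) : List (Int × String) :=
  (pvNUMBER_DICT.filter (fun wn => PySem.Chars.find cs wn.1.toList != -1)).map
    (fun wn => (PySem.Chars.find cs wn.1.toList, PySem.Int.toStr wn.2))

def pvDigits : List Char → Int → List (Int × String)
  | [], _ => []
  | c :: t, s =>
      (if PySem.Chars.strIsdigit [c] then [(s, String.ofList [c])] else []) ++ pvDigits t (s + 1)

-- the two independent components of pvScanStep
def pvFoundStep (cs : List Char) (found : PySem.Dict String Int) (ic : Int × Char) :
    PySem.Dict String Int :=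
  if PySem.Chars.strIsdigit [ic.2] then found
  else (pvBY_FIRST ic.2).foldl (fun found word =>
        if !(found.contains word) && PySem.Chars.startswith (cs.drop ic.1.toNat) word.toList
        then found.insert word ic.1 else found) found

def pvDigStep (dg : List (Int × String)) (ic : Int × Char) : List (Int × String) :=
  if PySem.Chars.strIsdigit [ic.2] then dg ++ [(ic.1, String.ofList [ic.2])] else dg

lemma pvScanStep_eq (cs : List Char) :
    pvScanStep cs = fun st ic => (pvFoundStep cs st.1 ic, pvDigStep st.2 ic) := by
  funext st ic
  by_cases h : PySem.Chars.strIsdigit [ic.2] <;>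
    simp [pvScanStep, pvFoundStep, pvDigStep, h]

-- facts about the nine literal words
lemma pv_word_facts : ∀ wn ∈ pvNUMBER_DICT,
    wn.1.toList ≠ [] ∧ PySem.Chars.strIsdigit [wn.1.toList.headI] = false ∧
      wn.1 ∈ pvBY_FIRST wn.1.toList.headI := by decide

lemma pv_no_prefix : ∀ wn1 ∈ pvNUMBER_DICT, ∀ wn2 ∈ pvNUMBER_DICT,
    wn1.1.toList <+: wn2.1.toList → wn1 = wn2 := by decide

lemma pv_dict_nodup : pvNUMBER_DICT.Nodup := by decide

lemma pvBY_FIRST_nodup (c : Char) : (pvBY_FIRST c).Nodup := by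
  unfold pvBY_FIRST; split_ifs <;> decide

-- generic fold shapes (Dict Int String)
lemma items_foldl_insert :
    ∀ (ps : List (Int × String)) (d : PySem.Dict Int String),
      (∀ p ∈ ps, d.contains p.1 = false) → (ps.map Prod.fst).Nodup →
      (ps.foldl (fun d p => d.insert p.1 p.2) d).items = d.items ++ ps
  | [], d, _, _ => by simp
  | p :: ps, d, hfresh, hnd => by
      have hc : d.contains p.1 = false := hfresh p (by simp)
      have hrest : ∀ q ∈ ps, (d.insert p.1 p.2).contains q.1 = false := by
        intro q hq
        have hne : q.1 ≠ p.1 := by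
          intro he
          have := (List.nodup_cons.mp hnd).1
          exact this (he ▸ List.mem_map_of_mem hq)
        rw [PySem.Dict.contains_insert]
        simp [hne, hfresh q (List.mem_cons_of_mem _ hq)]
      have ih := items_foldl_insert ps (d.insert p.1 p.2) hrest (List.nodup_cons.mp hnd).2
      simp only [List.foldl_cons, ih, PySem.Dict.items_insert_of_not_contains d p.2 hc,
        List.append_assoc, List.singleton_append]

lemma foldl_ite_insert {α : Type} (c : α → Bool) (k : α → Int) (v : α → String) :
    ∀ (l : List α) (d : PySem.Dict Int String),
      l.foldl (fun d x => if c x then d.insert (k x) (v x) else d) d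
        = ((l.filter c).map (fun x => (k x, v x))).foldl (fun d p => d.insert p.1 p.2) d
  | [], d => rfl
  | x :: l, d => by
      by_cases hx : c x <;>
        simp [hx, foldl_ite_insert c k v l]

lemma foldl_match_insert {α : Type} (g : α → Option Int) (v : α → String) :
    ∀ (l : List α) (d : PySem.Dict Int String),
      l.foldl (fun d x => match g x with
        | some i => d.insert i (v x)
        | none => d) d
        = ((l.filter (fun x => (g x).isSome)).map (fun x => ((g x).getD 0, v x))).foldl
            (fun d p => d.insert p.1 p.2) d
  | [], d => rfl
  | x :: l, d => by
      rcases hg : g x with _ | i <;>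
        simp [hg, foldl_match_insert g v l]

-- findFrom: one step of the left-to-right search
lemma pv_findFrom_len (cs w : List Char) (hw : w ≠ []) :
    PySem.Chars.findFrom cs w (cs.length : Int) = -1 := by
  rw [PySem.Chars.findFrom_natCast_eq_neg_one_iff cs w cs.length le_rfl]
  intro h
  exact hw (List.eq_nil_of_infix_nil (by simpa using h))

lemma pv_findFrom_step (cs w : List Char) (k : Nat) (hk : k < cs.length) (_hw : w ≠ []) :
    PySem.Chars.findFrom cs w (k : Int)
      = if w <+: cs.drop k then (k : Int) else PySem.Chars.findFrom cs w ((k + 1 : Nat) : Int) := by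
  have hk1 : k + 1 ≤ cs.length := hk
  have hdrop : cs[k] :: cs.drop (k + 1) = cs.drop k := List.getElem_cons_drop hk
  by_cases hpre : w <+: cs.drop k
  · rw [if_pos hpre]
    have hne : PySem.Chars.findFrom cs w (k : Int) ≠ -1 := fun h =>
      (PySem.Chars.findFrom_natCast_eq_neg_one_iff cs w k (le_of_lt hk)).mp h hpre.isInfix
    obtain ⟨hle, hp, hmin⟩ := PySem.Chars.findFrom_natCast_spec cs w k (le_of_lt hk) hne
    have h0 : (0 : Int) ≤ PySem.Chars.findFrom cs w (k : Int) := le_trans (by positivity) hle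
    have htn : (PySem.Chars.findFrom cs w (k : Int)).toNat ≤ k := by
      by_contra hgt
      exact hmin k le_rfl (by omega) hpre
    omega
  · rw [if_neg hpre]
    by_cases hinf : w <:+: cs.drop (k + 1)
    · have hne : PySem.Chars.findFrom cs w (k : Int) ≠ -1 := fun h =>
        (PySem.Chars.findFrom_natCast_eq_neg_one_iff cs w k (le_of_lt hk)).mp h
          (by rw [← hdrop]; exact List.infix_cons_iff.mpr (Or.inr hinf))
      have hne' : PySem.Chars.findFrom cs w ((k + 1 : Nat) : Int) ≠ -1 := fun h =>
        (PySem.Chars.findFrom_natCast_eq_neg_one_iff cs w (k + 1) hk1).mp h hinf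
      obtain ⟨hle, hp, hmin⟩ := PySem.Chars.findFrom_natCast_spec cs w k (le_of_lt hk) hne
      obtain ⟨hle', hp', hmin'⟩ := PySem.Chars.findFrom_natCast_spec cs w (k + 1) hk1 hne'
      have h0 : (0 : Int) ≤ PySem.Chars.findFrom cs w (k : Int) := le_trans (by positivity) hle
      have h0' : (0 : Int) ≤ PySem.Chars.findFrom cs w ((k + 1 : Nat) : Int) :=
        le_trans (by positivity) hle'
      have hrk : (PySem.Chars.findFrom cs w (k : Int)).toNat ≠ k := by
        intro he
        exact hpre (he ▸ hp)
      have h1 : ¬ (PySem.Chars.findFrom cs w (k : Int)).toNat < (PySem.Chars.findFrom cs w ((k + 1 : Nat) : Int)).toNat := by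
        intro hlt
        exact hmin' _ (by omega) hlt hp
      have h2 : ¬ (PySem.Chars.findFrom cs w ((k + 1 : Nat) : Int)).toNat < (PySem.Chars.findFrom cs w (k : Int)).toNat := by
        intro hlt
        exact hmin _ (by omega) hlt hp'
      omega
    · have e1 : PySem.Chars.findFrom cs w (k : Int) = -1 := by
        rw [PySem.Chars.findFrom_natCast_eq_neg_one_iff cs w k (le_of_lt hk)]
        intro h
        rw [← hdrop] at h
        rcases List.infix_cons_iff.mp h with h | h
        · exact hpre (by rw [← hdrop]; exact h)
        · exact hinf h
      have e2 : PySem.Chars.findFrom cs w ((k + 1 : Nat) : Int) = -1 := by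
        rw [PySem.Chars.findFrom_natCast_eq_neg_one_iff cs w (k + 1) hk1]
        exact fun h => hinf h
      rw [e1, e2]

-- effect of the inner word loop on one key
lemma pv_inner_get (pref : List Char) (k : Int) (w : String) :
    ∀ (ws : List String), ws.Nodup → ∀ (fd : PySem.Dict String Int),
      (ws.foldl (fun found word =>
          if !(found.contains word) && PySem.Chars.startswith pref word.toList
          then found.insert word k else found) fd).get? w
        = if w ∈ ws ∧ fd.contains w = false ∧ PySem.Chars.startswith pref w.toList = true
          then some k else fd.get? w
  | [], _, fd => by simp
  | u :: ws, hnd, fd => by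
      obtain ⟨hu_notin, hnd'⟩ := List.nodup_cons.mp hnd
      by_cases hu : u = w
      · subst hu
        by_cases hcond : (!(fd.contains u) && PySem.Chars.startswith pref u.toList) = true
        · simp only [List.foldl_cons, if_pos hcond]
          rw [pv_inner_get pref k u ws hnd' (fd.insert u k)]
          simp only [Bool.and_eq_true, Bool.not_eq_true'] at hcond
          simp [hu_notin, hcond.1, hcond.2, PySem.Dict.get?_insert_self]
        · simp only [List.foldl_cons, if_neg hcond]
          rw [pv_inner_get pref k u ws hnd' fd]
          simp only [Bool.and_eq_true, Bool.not_eq_true', not_and] at hcond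
          by_cases h1 : fd.contains u = false
          · have h2 : ¬ PySem.Chars.startswith pref u.toList = true := hcond h1
            simp [hu_notin, h2]
          · simp only [Bool.not_eq_false] at h1
            simp [hu_notin, h1]
      · have hu' : ¬ w = u := fun h => hu h.symm
        have hgw : (if !(fd.contains u) && PySem.Chars.startswith pref u.toList
              then fd.insert u k else fd).get? w = fd.get? w := by
          split
          · exact PySem.Dict.get?_insert_of_ne fd k hu'
          · rfl
        have hcw : (if !(fd.contains u) && PySem.Chars.startswith pref u.toList
              then fd.insert u k else fd).contains w = fd.contains w := by
          have h := congrArg Option.isSome hgw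
          rw [← PySem.Dict.contains_eq_isSome_get?, ← PySem.Dict.contains_eq_isSome_get?] at h
          exact h
        simp only [List.foldl_cons]
        rw [pv_inner_get pref k w ws hnd' _, hgw, hcw]
        simp [List.mem_cons, hu']
  termination_by ws => ws.length

-- the scan's found-dict holds each word's first occurrence (= findFrom)
lemma pv_scan_found (cs : List Char) (w : String) (hw : ∃ n, (w, n) ∈ pvNUMBER_DICT) :
    ∀ (t : List Char) (k : Nat) (fd : PySem.Dict String Int),
      k ≤ cs.length → cs.drop k = t →
      ((PySem.List.enumerate t (k : Int)).foldl (pvFoundStep cs) fd).get? w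
        = if fd.contains w = true then fd.get? w
          else if PySem.Chars.findFrom cs w.toList (k : Int) = -1 then none
          else some (PySem.Chars.findFrom cs w.toList (k : Int)) := by
  intro t
  induction t with
  | nil =>
      intro k fd hk hdrop
      have hke : k = cs.length := le_antisymm hk (List.drop_eq_nil_iff.mp hdrop)
      subst hke
      obtain ⟨n, hwn⟩ := hw
      obtain ⟨hwne, -, -⟩ := pv_word_facts (w, n) hwn
      rw [pv_findFrom_len cs w.toList hwne]
      simp only [PySem.List.enumerate, List.foldl_nil]
      by_cases hc : fd.contains w = true
      · simp [hc]
      · have hn : fd.get? w = none := by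
          rw [PySem.Dict.contains_eq_isSome_get?] at hc
          exact Option.not_isSome_iff_eq_none.mp (by simpa using hc)
        simp [hc, hn]
  | cons c t ih =>
      intro k fd hk hdrop
      have hklt : k < cs.length := by
        have := congrArg List.length hdrop
        simp [List.length_drop] at this
        omega
      have hdrop' : cs[k] :: cs.drop (k + 1) = c :: t := by
        rw [List.getElem_cons_drop hklt, hdrop]
      injection hdrop' with hck hdt
      obtain ⟨n, hwn⟩ := hw
      obtain ⟨hwne, hhdig, hhmem⟩ := pv_word_facts (w, n) hwn
      obtain ⟨c0, tl, hwl⟩ := List.exists_cons_of_ne_nil hwne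
      have henum : PySem.List.enumerate (c :: t) (k : Int)
          = ((k : Int), c) :: PySem.List.enumerate t ((k : Int) + 1) := by
        simp [PySem.List.enumerate]
      have hcast : (k : Int) + 1 = ((k + 1 : Nat) : Int) := by push_cast; ring
      rw [henum, List.foldl_cons, hcast]
      have hstep := ih (k + 1) (pvFoundStep cs fd ((k : Int), c)) (by omega) hdt
      rw [hstep]
      by_cases hd : PySem.Chars.strIsdigit [c] = true
      · -- a digit never starts a word
        have hfd : pvFoundStep cs fd ((k : Int), c) = fd := by
          simp [pvFoundStep, hd]
        have hnpre : ¬ w.toList <+: cs.drop k := by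
          intro hpre
          rw [hdrop, hwl] at hpre
          have hc0 : c0 = c := (List.cons_prefix_cons.mp hpre).1
          rw [hwl] at hhdig
          simp only [List.headI] at hhdig
          rw [hc0] at hhdig
          simp [hd] at hhdig
        rw [pv_findFrom_step cs w.toList k hklt hwne, if_neg hnpre, hfd]
      · -- letter: the inner word loop fires exactly on a first occurrence
        have hfd : pvFoundStep cs fd ((k : Int), c)
            = (pvBY_FIRST c).foldl (fun found word =>
                if !(found.contains word) &&
                    PySem.Chars.startswith (cs.drop ((k : Int)).toNat) word.toList
                then found.insert word (k : Int) else found) fd := by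
          simp [pvFoundStep, hd]
        have htn : ((k : Int)).toNat = k := Int.toNat_natCast k
        have hinner := pv_inner_get (cs.drop ((k : Int)).toNat) (k : Int) w
          (pvBY_FIRST c) (pvBY_FIRST_nodup c) fd
        rw [← hfd] at hinner
        have hcontains : (pvFoundStep cs fd ((k : Int), c)).contains w
            = ((pvFoundStep cs fd ((k : Int), c)).get? w).isSome :=
          PySem.Dict.contains_eq_isSome_get? _ _
        by_cases hcw : fd.contains w = true
        · have hget : (pvFoundStep cs fd ((k : Int), c)).get? w = fd.get? w := by
            rw [hinner, if_neg]
            simp [hcw]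
          have hcon : (pvFoundStep cs fd ((k : Int), c)).contains w = true := by
            rw [hcontains, hget, ← PySem.Dict.contains_eq_isSome_get?, hcw]
          rw [hcon, if_pos rfl, hget, if_pos hcw]
        · have hcwf : fd.contains w = false := by simpa using hcw
          by_cases hpre : w.toList <+: cs.drop k
          · have hsw : PySem.Chars.startswith (cs.drop ((k : Int)).toNat) w.toList = true := by
              rw [htn]
              exact (PySem.Chars.startswith_iff _ _).mpr hpre
            have hc0 : c0 = c := by
              have := hpre
              rw [hdrop, hwl] at this
              exact (List.cons_prefix_cons.mp this).1
            have hmem : w ∈ pvBY_FIRST c := by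
              rw [hwl] at hhmem
              simp only [List.headI] at hhmem
              rwa [hc0] at hhmem
            have hget : (pvFoundStep cs fd ((k : Int), c)).get? w = some (k : Int) := by
              rw [hinner, if_pos ⟨hmem, hcwf, hsw⟩]
            have hcon : (pvFoundStep cs fd ((k : Int), c)).contains w = true := by
              rw [hcontains, hget]
              rfl
            have hne : ((k : Int)) ≠ -1 := by omega
            rw [pv_findFrom_step cs w.toList k hklt hwne, if_pos hpre, hcon, hget]
            simp [hcwf, hne]
          · have hsw : ¬ PySem.Chars.startswith (cs.drop ((k : Int)).toNat) w.toList = true := by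
              rw [htn]
              exact fun h => hpre ((PySem.Chars.startswith_iff _ _).mp h)
            have hget : (pvFoundStep cs fd ((k : Int), c)).get? w = fd.get? w := by
              rw [hinner, if_neg (by tauto)]
            have hcon : (pvFoundStep cs fd ((k : Int), c)).contains w = false := by
              rw [hcontains, hget, ← PySem.Dict.contains_eq_isSome_get?, hcwf]
            rw [pv_findFrom_step cs w.toList k hklt hwne, if_neg hpre, hcon, hget]
            simp [hcwf]

-- the scan's digits component
lemma pv_scan_dig :
    ∀ (t : List Char) (s : Int) (dg : List (Int × String)),
      (PySem.List.enumerate t s).foldl pvDigStep dg = dg ++ pvDigits t s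
  | [], s, dg => by simp [PySem.List.enumerate, pvDigits]
  | c :: t, s, dg => by
      by_cases hd : PySem.Chars.strIsdigit [c] <;>
        simp [PySem.List.enumerate, pvDigits, pvDigStep, hd, pv_scan_dig t (s + 1)]

-- A's digit loop over range(len) equals the insert-fold over pvDigits
lemma pv_A_dig (cs : List Char) :
    ∀ (t : List Char) (k : Nat) (d : PySem.Dict Int String),
      k ≤ cs.length → cs.drop k = t →
      (PySem.List.pyRange (k : Int) (cs.length : Int) 1).foldl
        (fun d i => match PySem.List.pyGet? cs i with
          | some c => if PySem.Chars.strIsdigit [c] then d.insert i (String.ofList [c]) else d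
          | none => d) d
        = (pvDigits t (k : Int)).foldl (fun d p => d.insert p.1 p.2) d := by
  intro t
  induction t with
  | nil =>
      intro k d hk hdrop
      have hke : k = cs.length := le_antisymm hk (List.drop_eq_nil_iff.mp hdrop)
      subst hke
      have hnil : PySem.List.pyRange (cs.length : Int) (cs.length : Int) 1 = [] := by
        simp [PySem.List.pyRange]
      rw [hnil]
      simp [pvDigits]
  | cons c t ih =>
      intro k d hk hdrop
      have hklt : k < cs.length := by
        have := congrArg List.length hdrop
        simp [List.length_drop] at this
        omega
      have hdrop' : cs[k] :: cs.drop (k + 1) = c :: t := by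
        rw [List.getElem_cons_drop hklt, hdrop]
      injection hdrop' with hck hdt
      rw [PySem.List.pyRange_one_cons (by exact_mod_cast hklt), List.foldl_cons]
      have hget : PySem.List.pyGet? cs (k : Int) = some c := by
        rw [PySem.List.pyGet?_natCast, List.getElem?_eq_getElem hklt, hck]
      have hcast : (k : Int) + 1 = ((k + 1 : Nat) : Int) := by push_cast; ring
      rw [hcast]
      by_cases hd : PySem.Chars.strIsdigit [c] = true
      · have := ih (k + 1) (d.insert (k : Int) (String.ofList [c])) (by omega) hdt
        simp only [hget, hd, if_true]
        rw [this]
        simp only [pvDigits, if_pos hd, List.singleton_append, List.foldl_cons]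
        norm_cast
      · have := ih (k + 1) d (by omega) hdt
        simp only [hget]
        rw [if_neg hd]
        rw [this]
        simp only [pvDigits, if_neg hd, List.nil_append]
        norm_cast

-- membership facts about pvDigits
lemma pv_mem_pvDigits (p : Int × String) :
    ∀ (t : List Char) (k : Nat), p ∈ pvDigits t (k : Int) →
      ∃ j : Nat, ∃ h : j < t.length, p.1 = ((k + j : Nat) : Int) ∧
        PySem.Chars.strIsdigit [t[j]] = true := by
  intro t
  induction t with
  | nil => intro k hp; simp [pvDigits] at hp
  | cons c t ih =>
      intro k hp
      simp only [pvDigits, List.mem_append] at hp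
      rcases hp with hp | hp
      · by_cases hd : PySem.Chars.strIsdigit [c] = true
        · simp only [if_pos hd, List.mem_singleton] at hp
          refine ⟨0, by simp, ?_, by simp [hd]⟩
          simp [hp]
        · simp [hd] at hp
      · have hcast : (k : Int) + 1 = ((k + 1 : Nat) : Int) := by push_cast; ring
        rw [hcast] at hp
        obtain ⟨j, hj, hpj, hdig⟩ := ih (k + 1) hp
        refine ⟨j + 1, by simpa using hj, ?_, by simpa using hdig⟩
        rw [hpj]
        push_cast
        ring

lemma pv_pvDigits_key_lb : ∀ (t : List Char) (s : Int), ∀ p ∈ pvDigits t s, s ≤ p.1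
  | [], _, p, hp => by simp [pvDigits] at hp
  | c :: t, s, p, hp => by
      simp only [pvDigits, List.mem_append] at hp
      rcases hp with hp | hp
      · split at hp <;> simp_all
      · have := pv_pvDigits_key_lb t (s + 1) p hp
        omega

lemma pv_pvDigits_keys_nodup : ∀ (t : List Char) (s : Int), ((pvDigits t s).map Prod.fst).Nodup
  | [], _ => by simp [pvDigits]
  | c :: t, s => by
      by_cases hd : PySem.Chars.strIsdigit [c]
      · simp only [pvDigits, if_pos hd, List.singleton_append, List.map_cons, List.nodup_cons]
        constructor
        · intro hmem
          rcases List.mem_map.mp hmem with ⟨p, hp, he⟩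
          have := pv_pvDigits_key_lb t (s + 1) p hp
          omega
        · exact pv_pvDigits_keys_nodup t (s + 1)
      · simpa [pvDigits, if_neg hd] using pv_pvDigits_keys_nodup t (s + 1)

-- word keys: pairwise distinct
lemma pv_wordPairs_keys_nodup (cs : List Char) : ((pvWordPairs cs).map Prod.fst).Nodup := by
  unfold pvWordPairs
  rw [List.map_map]
  apply List.Nodup.map_on
  · intro x hx y hy hxy
    have hxd := List.mem_of_mem_filter hx
    have hyd := List.mem_of_mem_filter hy
    have hxne : PySem.Chars.find cs x.1.toList ≠ -1 := by
      have := List.of_mem_filter hx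
      simpa using this
    simp only [Function.comp] at hxy
    have hx0 : 0 ≤ PySem.Chars.find cs x.1.toList := by
      have := PySem.Chars.neg_one_le_find cs x.1.toList
      omega
    obtain ⟨hpx, -⟩ := PySem.Chars.find_spec hx0
    obtain ⟨hpy, -⟩ := PySem.Chars.find_spec (hxy ▸ hx0)
    rw [← hxy] at hpy
    rcases List.prefix_or_prefix_of_prefix hpx hpy with h | h
    · exact pv_no_prefix x hxd y hyd h
    · exact (pv_no_prefix y hyd x hxd h).symm
  · exact pv_dict_nodup.filter _

-- digit keys never collide with word keys
lemma pv_wp_dig_disjoint (cs : List Char) :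
    ∀ p ∈ pvDigits cs 0, p.1 ∉ (pvWordPairs cs).map Prod.fst := by
  intro p hp hmem
  obtain ⟨j, hj, hpj, hdig⟩ := pv_mem_pvDigits p cs 0 (by simpa using hp)
  simp only [Nat.zero_add] at hpj
  unfold pvWordPairs at hmem
  rw [List.map_map] at hmem
  obtain ⟨wn, hwn, hkey⟩ := List.mem_map.mp hmem
  have hwnd := List.mem_of_mem_filter hwn
  have hne : PySem.Chars.find cs wn.1.toList ≠ -1 := by
    have := List.of_mem_filter hwn
    simpa using this
  simp only [Function.comp] at hkey
  have h0 : 0 ≤ PySem.Chars.find cs wn.1.toList := by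
    have := PySem.Chars.neg_one_le_find cs wn.1.toList
    omega
  obtain ⟨hpre, -⟩ := PySem.Chars.find_spec h0
  have htn : (PySem.Chars.find cs wn.1.toList).toNat = j := by
    rw [hkey, hpj]
    exact Int.toNat_natCast j
  rw [htn] at hpre
  obtain ⟨hwne, hhdig, -⟩ := pv_word_facts wn hwnd
  obtain ⟨c0, tl, hwl⟩ := List.exists_cons_of_ne_nil hwne
  have hdropj : cs[j] :: cs.drop (j + 1) = cs.drop j := List.getElem_cons_drop hj
  rw [hwl, ← hdropj] at hpre
  have hc0 : c0 = cs[j] := (List.cons_prefix_cons.mp hpre).1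
  rw [hwl] at hhdig
  simp only [List.headI] at hhdig
  rw [hc0] at hhdig
  rw [hhdig] at hdig
  exact Bool.false_ne_true hdig

-- assembling the dicts: words first, then the digits
lemma pv_insert_words (cs : List Char) :
    ((pvWordPairs cs).foldl (fun d p => d.insert p.1 p.2) PySem.Dict.empty).items
      = pvWordPairs cs := by
  rw [items_foldl_insert (pvWordPairs cs) PySem.Dict.empty
      (fun p _ => PySem.Dict.contains_empty p.1) (pv_wordPairs_keys_nodup cs)]
  rfl

lemma pv_insert_digits (cs : List Char) (d : PySem.Dict Int String)
    (hd : d.items = pvWordPairs cs) :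
    ((pvDigits cs 0).foldl (fun d p => d.insert p.1 p.2) d).items
      = pvWordPairs cs ++ pvDigits cs 0 := by
  have hfresh : ∀ p ∈ pvDigits cs 0, d.contains p.1 = false := by
    intro p hp
    rw [PySem.Dict.contains_eq_decide_mem_keys]
    have hk : d.keys = (pvWordPairs cs).map Prod.fst := by
      rw [show d.keys = d.items.map Prod.fst from rfl, hd]
    rw [hk]
    exact decide_eq_false (pv_wp_dig_disjoint cs p hp)
  rw [items_foldl_insert (pvDigits cs 0) d hfresh (pv_pvDigits_keys_nodup cs 0), hd]

-- A's digit loop, from index 0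
lemma pv_A_dig0 (cs : List Char) (d : PySem.Dict Int String) :
    (PySem.List.pyRange 0 (cs.length : Int) 1).foldl
      (fun d i => match PySem.List.pyGet? cs i with
        | some c => if PySem.Chars.strIsdigit [c] then d.insert i (String.ofList [c]) else d
        | none => d) d
      = (pvDigits cs 0).foldl (fun d p => d.insert p.1 p.2) d := by
  have h := pv_A_dig cs cs 0 d (Nat.zero_le _) (by simp)
  simpa using h

-- both line bodies compute pvWordPairs ++ pvDigits
lemma pv_lineA_eq (s : String) : pvLineA s = pvWordPairs s.toList ++ pvDigits s.toList 0 := by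
  unfold pvLineA
  simp only [PySem.Str.find_eq, PySem.Str.len_eq, PySem.Str.pyGet?_eq,
    PySem.Chars.pyGet?_eq_listPyGet?]
  rw [foldl_ite_insert (fun wn => PySem.Chars.find s.toList wn.1.toList != -1)
      (fun wn => PySem.Chars.find s.toList wn.1.toList) (fun wn => PySem.Int.toStr wn.2)
      pvNUMBER_DICT PySem.Dict.empty]
  rw [pv_A_dig0 s.toList]
  exact pv_insert_digits s.toList _ (pv_insert_words s.toList)

lemma pv_lineB_eq (s : String) : pvLineB s = pvWordPairs s.toList ++ pvDigits s.toList 0 := by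
  unfold pvLineB
  rw [pvScanStep_eq, PySem.List.foldl_prod_mk]
  simp only [pv_scan_dig s.toList 0 [], List.nil_append]
  have hfound : ∀ wn ∈ pvNUMBER_DICT,
      (List.foldl (pvFoundStep s.toList) PySem.Dict.empty
          (PySem.List.enumerate s.toList 0)).get? wn.1
        = if PySem.Chars.find s.toList wn.1.toList = -1 then none
          else some (PySem.Chars.find s.toList wn.1.toList) := by
    intro wn hwn
    have h := pv_scan_found s.toList wn.1 ⟨wn.2, by simpa using hwn⟩ s.toList 0
      PySem.Dict.empty (Nat.zero_le _) (by simp)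
    simpa [PySem.Dict.contains_empty, PySem.Chars.findFrom_zero] using h
  rw [foldl_match_insert
      (fun wn => (List.foldl (pvFoundStep s.toList) PySem.Dict.empty
          (PySem.List.enumerate s.toList 0)).get? wn.1)
      (fun wn => PySem.Int.toStr wn.2) pvNUMBER_DICT PySem.Dict.empty]
  have hfilter : pvNUMBER_DICT.filter
        (fun wn => ((List.foldl (pvFoundStep s.toList) PySem.Dict.empty
          (PySem.List.enumerate s.toList 0)).get? wn.1).isSome)
      = pvNUMBER_DICT.filter (fun wn => PySem.Chars.find s.toList wn.1.toList != -1) := by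
    apply List.filter_congr
    intro wn hwn
    rw [hfound wn hwn]
    by_cases h : PySem.Chars.find s.toList wn.1.toList = -1
    · simp [h]
    · simp [h]
  rw [hfilter]
  have hmap : (pvNUMBER_DICT.filter
        (fun wn => PySem.Chars.find s.toList wn.1.toList != -1)).map
          (fun wn => (((List.foldl (pvFoundStep s.toList) PySem.Dict.empty
            (PySem.List.enumerate s.toList 0)).get? wn.1).getD 0, PySem.Int.toStr wn.2))
      = (pvNUMBER_DICT.filter
        (fun wn => PySem.Chars.find s.toList wn.1.toList != -1)).map
          (fun wn => (PySem.Chars.find s.toList wn.1.toList, PySem.Int.toStr wn.2)) := by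
    apply List.map_congr_left
    intro wn hwn
    have hne : PySem.Chars.find s.toList wn.1.toList ≠ -1 := by
      have := List.of_mem_filter hwn
      simpa using this
    rw [hfound wn (List.mem_of_mem_filter hwn), if_neg hne]
    rfl
  rw [hmap]
  exact pv_insert_digits s.toList _ (pv_insert_words s.toList)

-- ===== VERDICT (by name: the statement is the Claim_ definition above) =====
theorem find_number_locations_spec : Claim_equal_find_number_locations := by
  intro puzzle_input _
  show find_number_locations puzzle_input = find_number_locations_alt puzzle_input
  unfold find_number_locations find_number_locations_alt
  rw [PySem.List.foldl_append_singleton_eq_map pvLineA puzzle_input [],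
    PySem.List.foldl_append_singleton_eq_map pvLineB puzzle_input []]
  simp only [List.nil_append]
  exact List.map_congr_left fun s _ => (pv_lineA_eq s).trans (pv_lineB_eq s).symm
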